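-- pv_equiv track=rewrite | github.com/Ynewtime/markitai | packages/markitai/src/markitai/providers/__init__.py | check_deprecated_models
-- ===== SOURCE A (Python) =====
-- DEPRECATED_MODELS: dict[str, str] = {
--     "gpt-4o": "gpt-5.2",
--     "gpt-4.1": "gpt-5.2",
--     "gpt-4.1-mini": "gpt-5.2",
--     "o4-mini": "gpt-5.2",
--     "gpt-5": "gpt-5.2",
-- }
--
-- def check_deprecated_models(models: list[str]) -> list[str]:
--     """Check for deprecated models and return warning messages.
--
--     Args:
--         models: List of model identifiers (e.g., ["copilot/gpt-4o", "openai/gpt-4.1"])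
--
--     Returns:
--         List of deprecation warning messages
--     """
--     warnings: list[str] = []
--     seen: set[str] = set()
--
--     for model in models:
--         # Extract the actual model name (strip provider prefix)
--         if "/" in model:
--             model_name = model.split("/", 1)[1]
--         else:
--             model_name = model
--
--         # Check if model is deprecated
--         if model_name in DEPRECATED_MODELS and model_name not in seen:
--             seen.add(model_name)
--             replacement = DEPRECATED_MODELS[model_name]
--             warnings.append(
--                 f"⚠️  Model '{model_name}' was retired on February 13, 2025."
--                 f"\n   Please migrate to: {replacement}"
--             )
--
--     return warnings
-- ===== SOURCE B (Python) =====
-- DEPRECATED_MODELS: dict[str, str] = {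
--     "gpt-4o": "gpt-5.2",
--     "gpt-4.1": "gpt-5.2",
--     "gpt-4.1-mini": "gpt-5.2",
--     "o4-mini": "gpt-5.2",
--     "gpt-5": "gpt-5.2",
-- }
--
-- def _bare(model: str) -> str:
--     return model.split("/", 1)[1] if "/" in model else model
--
-- def check_deprecated_models(models: list[str]) -> list[str]:
--     # Worklist algorithm: walk the pending list; whenever a deprecated name is
--     # emitted, filter every later occurrence of the same bare name out of the
--     # pending list, so no seen-set is ever needed.
--     warnings: list[str] = []
--     pending = list(models)
--     i = 0
--     while i < len(pending):
--         name = _bare(pending[i])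
--         i += 1
--         if name in DEPRECATED_MODELS:
--             warnings.append(
--                 f"⚠️  Model '{name}' was retired on February 13, 2025."
--                 f"\n   Please migrate to: {DEPRECATED_MODELS[name]}"
--             )
--             pending = pending[:i] + [m for m in pending[i:] if _bare(m) != name]
--     return warnings
-- ===== Notes on version B (the rewrite author's own statement) =====
-- stated objective: alternative
-- what changed: Replaces A's single pass with a seen-set by a worklist algorithm: pop the next pending model and, whenever a deprecated name is emitted, filter every later occurrence of that bare name out of the remaining pending list, so no seen-set (or any dedup structure) is maintained.
import Mathlib
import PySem

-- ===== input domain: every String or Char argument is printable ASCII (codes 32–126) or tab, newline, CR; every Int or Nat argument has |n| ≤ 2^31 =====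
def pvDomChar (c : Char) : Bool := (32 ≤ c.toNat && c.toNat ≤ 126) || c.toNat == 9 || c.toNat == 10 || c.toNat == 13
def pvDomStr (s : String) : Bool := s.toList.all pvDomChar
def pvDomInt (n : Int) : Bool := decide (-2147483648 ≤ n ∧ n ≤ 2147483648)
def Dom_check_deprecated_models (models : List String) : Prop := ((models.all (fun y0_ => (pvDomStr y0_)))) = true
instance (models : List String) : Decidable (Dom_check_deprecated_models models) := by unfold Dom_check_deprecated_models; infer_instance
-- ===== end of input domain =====

-- B replaces A's single pass with a seen-set by a worklist algorithm: pop the next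
-- pending model and, on emitting a warning, filter every later occurrence of that
-- bare name out of the pending list — no seen-set at all (alternative decomposition).

-- shared module constant: DEPRECATED_MODELS
def DEPRECATED_MODELS : PySem.Dict String String :=
  PySem.Dict.ofList [("gpt-4o", "gpt-5.2"), ("gpt-4.1", "gpt-5.2"),
    ("gpt-4.1-mini", "gpt-5.2"), ("o4-mini", "gpt-5.2"), ("gpt-5", "gpt-5.2")]

-- both Pythons compute the bare model name the same way: m.split("/", 1)[1] if "/" in m else m
def pvStripName (m : String) : String :=
  if PySem.Str.isIn "/" m then
    PySem.List.pyGetD ((PySem.Str.splitMax? m "/" 1).getD []) 1 ""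
  else m

-- the f-string both Pythons format (concatenation of its pieces)
def pvMsg (name repl : String) : String :=
  PySem.Str.join "" ["⚠️  Model '", name,
    "' was retired on February 13, 2025.\n   Please migrate to: ", repl]

-- ===== PORT A =====
def check_deprecated_models (models : List String) : List String :=
  (models.foldl
    (fun (st : List String × PySem.Set String) model =>
      let model_name := pvStripName model
      if DEPRECATED_MODELS.contains model_name && !(PySem.Set.contains st.2 model_name) then
        (st.1 ++ [pvMsg model_name (DEPRECATED_MODELS.getD model_name "")],
         PySem.Set.add st.2 model_name)
      else st)
    ([], PySem.Set.empty)).1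

-- ===== PORT B =====
-- B's while loop: i walks the pending worklist; on a deprecated name the loop
-- emits the warning and filters later occurrences of that name out of pending.
def pvAltLoop (warnings : List String) (pending : List String) (i : Nat) : List String :=
  if h : i < pending.length then
    let name := pvStripName pending[i]
    if DEPRECATED_MODELS.contains name then
      pvAltLoop (warnings ++ [pvMsg name (DEPRECATED_MODELS.getD name "")])
        (pending.take (i + 1) ++ (pending.drop (i + 1)).filter (fun m => pvStripName m != name))
        (i + 1)
    else pvAltLoop warnings pending (i + 1)
  else warnings
termination_by pending.length - i
decreasing_by
  · have hlen : (pending.take (i + 1)).length = i + 1 := by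
      simp [List.length_take, Nat.min_eq_left (Nat.succ_le_of_lt h)]
    have hf := List.length_filter_le (fun m => pvStripName m != pvStripName pending[i]) (pending.drop (i + 1))
    simp only [List.length_append, hlen, List.length_drop] at *
    omega
  · omega

def check_deprecated_models_alt (models : List String) : List String :=
  pvAltLoop [] models 0

-- ===== PRECONDITION & SPEC =====
def Spec_check_deprecated_models (models : List String) (out : List String) : Prop := out = check_deprecated_models_alt models
instance (models : List String) (out : List String) : Decidable (Spec_check_deprecated_models models out) := by unfold Spec_check_deprecated_models; infer_instance

-- ===== CLAIM (what is proved, stated in full; the proofs are below) =====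
def Claim_equal_check_deprecated_models : Prop := ∀ (models : List String), Dom_check_deprecated_models models → Spec_check_deprecated_models models (check_deprecated_models models)

-- ===== LEMMAS AND PROOFS =====

-- proof-side restatement of B's while loop as structural recursion on the pending list
def pvAltOld (warnings : List String) (pending : List String) : List String :=
  match pending with
  | [] => warnings
  | head :: rest =>
    let name := pvStripName head
    if DEPRECATED_MODELS.contains name then
      pvAltOld (warnings ++ [pvMsg name (DEPRECATED_MODELS.getD name "")])
        (rest.filter (fun m => pvStripName m != name))
    else pvAltOld warnings rest
termination_by pending.length
decreasing_by
  · simp only [List.length_unattach]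
    exact Nat.lt_succ_of_le (le_trans (List.length_filter_le _ _) (by simp))
  · exact Nat.lt_succ_self _

-- A's loop body (proof-side name for the lambda of port A)
def pvStepA (st : List String × PySem.Set String) (model : String) : List String × PySem.Set String :=
  let model_name := pvStripName model
  if DEPRECATED_MODELS.contains model_name && !(PySem.Set.contains st.2 model_name) then
    (st.1 ++ [pvMsg model_name (DEPRECATED_MODELS.getD model_name "")],
     PySem.Set.add st.2 model_name)
  else st

lemma pvContains_add (s : PySem.Set String) (n x : String) :
    PySem.Set.contains (PySem.Set.add s n) x = (PySem.Set.contains s x || x == n) := by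
  by_cases h1 : x ∈ s <;> by_cases h2 : x = n <;>
    simp [PySem.Set.mem_add, h1, h2]

lemma pvAltOld_cons (w : List String) (head : String) (rest : List String) :
    pvAltOld w (head :: rest)
      = if DEPRECATED_MODELS.contains (pvStripName head) = true then
          pvAltOld (w ++ [pvMsg (pvStripName head) (DEPRECATED_MODELS.getD (pvStripName head) "")])
            (rest.filter (fun m => pvStripName m != pvStripName head))
        else pvAltOld w rest := by
  rw [pvAltOld.eq_def]

-- the invariant: A's fold from (w, s) over ms equals B's worklist loop started at
-- warnings = w on ms with the models whose bare name is already in s filtered out.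
lemma pvCore : ∀ (k : Nat) (ms : List String), ms.length ≤ k → ∀ (w : List String) (s : PySem.Set String),
    (ms.foldl pvStepA (w, s)).1
      = pvAltOld w (ms.filter (fun m => !(PySem.Set.contains s (pvStripName m)))) := by
  intro k
  induction k with
  | zero =>
    intro ms hlen w s
    have : ms = [] := List.eq_nil_of_length_eq_zero (Nat.le_zero.mp hlen)
    subst this
    simp [pvAltOld]
  | succ k ih =>
    intro ms hlen w s
    cases ms with
    | nil => simp [pvAltOld]
    | cons m ms' =>
      have hlen' : ms'.length ≤ k := Nat.le_of_succ_le_succ hlen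
      by_cases hm : pvStripName m ∈ s
      · -- m already seen: A's step is a no-op, B filters m out
        have hstep : pvStepA (w, s) m = (w, s) := by
          unfold pvStepA
          simp [PySem.Set.contains, hm]
        rw [List.foldl_cons, hstep, List.filter_cons, ih ms' hlen' w s]
        simp [PySem.Set.contains, hm]
      · rw [List.foldl_cons, List.filter_cons]
        by_cases hd : DEPRECATED_MODELS.contains (pvStripName m) = true
        · -- deprecated and unseen: A emits and adds to seen, B emits and filters
          have hstep : pvStepA (w, s) m
              = (w ++ [pvMsg (pvStripName m) (DEPRECATED_MODELS.getD (pvStripName m) "")],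
                 PySem.Set.add s (pvStripName m)) := by
            unfold pvStepA
            simp [PySem.Set.contains, hd, hm]
          rw [hstep,
            ih ms' hlen' (w ++ [pvMsg (pvStripName m) (DEPRECATED_MODELS.getD (pvStripName m) "")])
              (PySem.Set.add s (pvStripName m))]
          have hfil : ms'.filter (fun x => !(PySem.Set.contains (PySem.Set.add s (pvStripName m)) (pvStripName x)))
              = (ms'.filter (fun x => !(PySem.Set.contains s (pvStripName x)))).filter
                  (fun x => pvStripName x != pvStripName m) := by
            rw [List.filter_filter]
            apply List.filter_congr
            intro x _
            rw [pvContains_add]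
            by_cases h1 : pvStripName x = pvStripName m <;>
              by_cases h2 : pvStripName x ∈ s <;>
                simp [PySem.Set.contains, h1, h2, bne]
          have hcond : (!PySem.Set.contains s (pvStripName m)) = true := by
            simp [PySem.Set.contains, hm]
          rw [hfil, if_pos hcond, pvAltOld_cons, if_pos hd]
        · -- not deprecated: A's step is a no-op, B pops the head and recurses
          have hd' : DEPRECATED_MODELS.contains (pvStripName m) = false := by
            cases h : DEPRECATED_MODELS.contains (pvStripName m)
            · rfl
            · exact absurd h hd
          have hstep : pvStepA (w, s) m = (w, s) := by
            unfold pvStepA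
            simp [hd']
          have hcond : (!PySem.Set.contains s (pvStripName m)) = true := by
            simp [PySem.Set.contains, hm]
          rw [hstep, ih ms' hlen' w s, if_pos hcond, pvAltOld_cons, if_neg hd]

-- B's indexed while loop equals the structural recursion on the dropped suffix
lemma pvAltLoop_eq_old : ∀ (k : Nat) (pending : List String) (i : Nat),
    pending.length - i ≤ k → ∀ (w : List String),
    pvAltLoop w pending i = pvAltOld w (pending.drop i) := by
  intro k
  induction k with
  | zero =>
    intro pending i hk w
    have h : ¬ i < pending.length := by omega
    rw [pvAltLoop, dif_neg h, List.drop_of_length_le (by omega), pvAltOld]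
  | succ k ih =>
    intro pending i hk w
    by_cases h : i < pending.length
    · have hdrop : pending.drop i = pending[i] :: pending.drop (i + 1) :=
        List.drop_eq_getElem_cons h
      rw [pvAltLoop, dif_pos h, hdrop, pvAltOld_cons]
      by_cases hd : DEPRECATED_MODELS.contains (pvStripName pending[i]) = true
      · rw [if_pos hd, if_pos hd]
        have hlen : (pending.take (i + 1)).length = i + 1 := by
          simp [List.length_take, Nat.min_eq_left (Nat.succ_le_of_lt h)]
        have hnew : (pending.take (i + 1)
              ++ (pending.drop (i + 1)).filter (fun m => pvStripName m != pvStripName pending[i])).drop (i + 1)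
            = (pending.drop (i + 1)).filter (fun m => pvStripName m != pvStripName pending[i]) :=
          List.drop_left' hlen
        rw [ih _ (i + 1) (by
          have hf := List.length_filter_le (fun m => pvStripName m != pvStripName pending[i]) (pending.drop (i + 1))
          simp only [List.length_append, hlen, List.length_drop] at *
          omega), hnew]
      · rw [if_neg hd, if_neg hd, ih pending (i + 1) (by omega)]
    · rw [pvAltLoop, dif_neg h, List.drop_of_length_le (by omega), pvAltOld]

-- ===== VERDICT (by name: the statement is the Claim_ definition above) =====
theorem check_deprecated_models_spec : Claim_equal_check_deprecated_models := by
  intro models _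
  show (models.foldl pvStepA ([], PySem.Set.empty)).1 = pvAltLoop [] models 0
  rw [pvAltLoop_eq_old models.length models 0 (by omega) [], List.drop_zero]
  rw [pvCore models.length models (Nat.le_refl _) [] PySem.Set.empty]
  congr 1
  apply List.filter_eq_self.mpr
  intro x _
  simp [PySem.Set.empty, PySem.Set.contains]
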